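-- pv_equiv track=rewrite | github.com/lzero1115/truss_rl | curriculum_generator.py | get_largest_connected_component_with_fixed_nodes
-- ===== SOURCE A (Python) =====
-- from collections import defaultdict, deque
--
-- def get_largest_connected_component_with_fixed_nodes(edges, fixed_nodes):
--     """Find the largest connected component that includes at least one fixed node"""
--     if not edges:
--         return []
--
--     # Build adjacency list
--     adj = defaultdict(list)
--     nodes = set()
--
--     for u, v in edges:
--         adj[u].append(v)
--         adj[v].append(u)
--         nodes.update([u, v])
--
--     # Find all connected components
--     visited = set()
--     components = []
--
--     for node in nodes:
--         if node not in visited: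
--             # BFS to find this component
--             component_nodes = set()
--             queue = deque([node])
--
--             while queue:
--                 curr = queue.popleft()
--                 if curr not in visited:
--                     visited.add(curr)
--                     component_nodes.add(curr)
--                     for neighbor in adj[curr]:
--                         if neighbor not in visited:
--                             queue.append(neighbor)
--
--             # Get edges in this component
--             component_edges = []
--             for u, v in edges:
--                 if u in component_nodes and v in component_nodes:
--                     component_edges.append((u, v))
--
--             # Check if this component includes any fixed nodes
--             has_fixed_node = any(node in fixed_nodes for node in component_nodes)
--
--             components.append({
--                 'edges': component_edges,
--                 'nodes': component_nodes,
--                 'has_fixed': has_fixed_node,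
--                 'size': len(component_edges)
--             })
--
--     # Filter components that include fixed nodes
--     valid_components = [comp for comp in components if comp['has_fixed']]
--
--     if not valid_components:
--         # If no component includes fixed nodes, return the largest component
--         return max(components, key=lambda x: x['size'])['edges'] if components else []
--
--     # Return the largest component that includes fixed nodes
--     largest_valid = max(valid_components, key=lambda x: x['size'])
--     return largest_valid['edges']
-- ===== SOURCE B (Python) =====
-- from collections import defaultdict, deque
--
-- def get_largest_connected_component_with_fixed_nodes(edges, fixed_nodes):
--     """Largest component (by edge count) containing a fixed node, via one labeling
--     pass over the graph and single-pass edge bucketing."""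
--     if not edges:
--         return []
--
--     adj = defaultdict(list)
--     for u, v in edges:
--         adj[u].append(v)
--         adj[v].append(u)
--
--     # One BFS sweep assigning each node a component id, in first-occurrence order.
--     comp = {}
--     n_comps = 0
--     for u, v in edges:
--         for start in (u, v):
--             if start not in comp:
--                 queue = deque([start])
--                 while queue:
--                     curr = queue.popleft()
--                     if curr not in comp:
--                         comp[curr] = n_comps
--                         for nb in adj[curr]:
--                             if nb not in comp:
--                                 queue.append(nb)
--                 n_comps += 1
--
--     # Single pass: edges per component.
--     sizes = [0] * n_comps
--     for u, v in edges:
--         cu = comp[u]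
--         if cu == comp[v]:
--             sizes[cu] += 1
--
--     # Single pass over fixed_nodes: which components hold a fixed node.
--     has_fixed = [False] * n_comps
--     for f in fixed_nodes:
--         if f in comp:
--             has_fixed[comp[f]] = True
--
--     pool = [i for i in range(n_comps) if has_fixed[i]]
--     if not pool:
--         pool = range(n_comps)
--     best = max(pool, key=lambda i: sizes[i])
--     return [(u, v) for u, v in edges if comp[u] == best and comp[v] == best]
-- ===== Notes on version B (the rewrite author's own statement) =====
-- stated objective: alternative
-- what changed: A re-scans the whole edge list once per component and scans fixed_nodes once per visited node; B labels every node with a component id in one BFS sweep, then aggregates edge counts and fixed-node flags per component in single passes and emits the winning component's edges with one final filter.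
-- outside the precondition, e.g. on get_largest_connected_component_with_fixed_nodes([(10, 3), (9, 2)], set()): A returns [(9, 2)], B returns [(10, 3)]; on get_largest_connected_component_with_fixed_nodes([(-3, 2), (0, -1)], {-4, -2}): A returns [(0, -1)], B returns [(-3, 2)]
import Mathlib
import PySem

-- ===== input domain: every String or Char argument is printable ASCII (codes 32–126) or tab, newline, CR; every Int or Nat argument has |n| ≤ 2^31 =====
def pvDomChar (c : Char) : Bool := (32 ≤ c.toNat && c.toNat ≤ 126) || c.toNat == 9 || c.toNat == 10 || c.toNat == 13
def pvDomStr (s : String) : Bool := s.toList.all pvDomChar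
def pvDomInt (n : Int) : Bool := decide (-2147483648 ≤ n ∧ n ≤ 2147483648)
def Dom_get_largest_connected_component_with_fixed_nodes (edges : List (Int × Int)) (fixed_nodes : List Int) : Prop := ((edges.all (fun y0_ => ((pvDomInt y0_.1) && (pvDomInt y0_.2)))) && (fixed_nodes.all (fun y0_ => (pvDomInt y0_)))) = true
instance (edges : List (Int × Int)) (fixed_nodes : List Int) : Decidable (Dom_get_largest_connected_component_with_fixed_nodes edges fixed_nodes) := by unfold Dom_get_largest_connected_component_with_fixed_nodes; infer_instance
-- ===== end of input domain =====

-- B replaces A's per-component re-scan of all edges and per-node scan of fixed_nodes by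
-- one node-labeling sweep plus single-pass edge/fixed-node bucketing (a different
-- aggregation structure; neither program mutates its arguments).

-- ===== PORT A =====
-- one entry of A's `components` list: (edges, nodes, has_fixed, size)
abbrev pvEntry : Type := List (Int × Int) × PySem.Set Int × Bool × Int

-- A's first loop: builds the defaultdict adjacency and the `nodes` set together.
def pvBuildA (edges : List (Int × Int)) : PySem.Dict Int (List Int) × PySem.Set Int :=
  edges.foldl (fun st p =>
      ((st.1.modify p.1 [] (· ++ [p.2])).modify p.2 [] (· ++ [p.1]),
       PySem.Set.add (PySem.Set.add st.2 p.1) p.2))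
    (PySem.Dict.empty, PySem.Set.empty)

-- A's inner BFS (`while queue:`); fuel = a bound on the number of pops (totality guard only)
def pvBfsA (adj : PySem.Dict Int (List Int)) :
    Nat → List Int → PySem.Set Int → PySem.Set Int → PySem.Set Int × PySem.Set Int
  | 0, _, visited, comp => (visited, comp)
  | _ + 1, [], visited, comp => (visited, comp)
  | fuel + 1, curr :: queue, visited, comp =>
    if PySem.Set.contains visited curr then pvBfsA adj fuel queue visited comp
    else
      let visited' := PySem.Set.add visited curr
      let comp' := PySem.Set.add comp curr
      pvBfsA adj fuel
        (queue ++ (adj.getD curr []).filter (fun nb => !(PySem.Set.contains visited' nb)))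
        visited' comp'

-- A's body of `for node in nodes:` (state: visited set, components list)
def pvStepA (edges : List (Int × Int)) (fixed_nodes : List Int)
    (adj : PySem.Dict Int (List Int)) (st : PySem.Set Int × List pvEntry) (node : Int) :
    PySem.Set Int × List pvEntry :=
  if PySem.Set.contains st.1 node then st
  else
    let r := pvBfsA adj (2 * edges.length + 2) [node] st.1 PySem.Set.empty
    let compEdges := edges.filter (fun p =>
      PySem.Set.contains r.2 p.1 && PySem.Set.contains r.2 p.2)
    let hasFixed := List.any r.2 (fun x => fixed_nodes.contains x)
    (r.1, st.2 ++ [(compEdges, r.2, hasFixed, (compEdges.length : Int))])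

def get_largest_connected_component_with_fixed_nodes (edges : List (Int × Int)) (fixed_nodes : List Int) : List (Int × Int) :=
  if edges.isEmpty then []
  else
    let ba := pvBuildA edges
    let comps := ((ba.2 : List Int).foldl (pvStepA edges fixed_nodes ba.1) (PySem.Set.empty, [])).2
    let valid := comps.filter (fun c => c.2.2.1)
    if valid.isEmpty then
      -- `max(components, key=lambda x: x['size'])['edges'] if components else []`
      match PySem.List.max? comps (fun c => c.2.2.2) with
      | none => []
      | some c => c.1
    else
      match PySem.List.max? valid (fun c => c.2.2.2) with
      | none => []   -- unreachable: valid ≠ []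
      | some c => c.1

-- ===== PORT B =====
def pvAdjB (edges : List (Int × Int)) : PySem.Dict Int (List Int) :=
  edges.foldl (fun d p => (d.modify p.1 [] (· ++ [p.2])).modify p.2 [] (· ++ [p.1]))
    PySem.Dict.empty

-- B's BFS (`while queue:`), labeling nodes with the component id; fuel = totality guard
def pvBfsB (adj : PySem.Dict Int (List Int)) :
    Nat → List Int → PySem.Dict Int Int → Int → PySem.Dict Int Int
  | 0, _, comp, _ => comp
  | _ + 1, [], comp, _ => comp
  | fuel + 1, curr :: queue, comp, cid =>
    if comp.contains curr then pvBfsB adj fuel queue comp cid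
    else
      let comp' := comp.insert curr cid
      pvBfsB adj fuel
        (queue ++ (adj.getD curr []).filter (fun nb => !(comp'.contains nb)))
        comp' cid

-- B's body of `for start in (u, v): if start not in comp: …`
def pvLStep (edges : List (Int × Int)) (adj : PySem.Dict Int (List Int))
    (st : PySem.Dict Int Int × Int) (node : Int) : PySem.Dict Int Int × Int :=
  if st.1.contains node then st
  else (pvBfsB adj (2 * edges.length + 2) [node] st.1 st.2, st.2 + 1)

def pvLabel (edges : List (Int × Int)) (adj : PySem.Dict Int (List Int)) :
    PySem.Dict Int Int × Int :=
  edges.foldl (fun st p => pvLStep edges adj (pvLStep edges adj st p.1) p.2)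
    (PySem.Dict.empty, 0)

-- `sizes[cu] += 1` loop; comp[u]/comp[v] always hit (every endpoint is labeled), the
-- `none` branches are unreachable totality guards
def pvSizes (edges : List (Int × Int)) (comp : PySem.Dict Int Int) (n : Int) : List Int :=
  edges.foldl (fun sizes p =>
      match comp.get? p.1, comp.get? p.2 with
      | some cu, some cv =>
        if cu == cv then PySem.List.pySetD sizes cu (PySem.List.pyGetD sizes cu 0 + 1)
        else sizes
      | _, _ => sizes)
    (List.replicate n.toNat 0)

-- `if f in comp: has_fixed[comp[f]] = True` loop
def pvFlags (fixed_nodes : List Int) (comp : PySem.Dict Int Int) (n : Int) : List Bool :=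
  fixed_nodes.foldl (fun flags f =>
      match comp.get? f with
      | some cf => PySem.List.pySetD flags cf true
      | none => flags)
    (List.replicate n.toNat false)

def get_largest_connected_component_with_fixed_nodes_alt (edges : List (Int × Int)) (fixed_nodes : List Int) : List (Int × Int) :=
  if edges.isEmpty then []
  else
    let adj := pvAdjB edges
    let lc := pvLabel edges adj
    let sizes := pvSizes edges lc.1 lc.2
    let flags := pvFlags fixed_nodes lc.1 lc.2
    let pool0 := (PySem.List.pyRange 0 lc.2 1).filter (fun i => PySem.List.pyGetD flags i false)
    let pool := if pool0.isEmpty then PySem.List.pyRange 0 lc.2 1 else pool0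
    match PySem.List.max? pool (fun i => PySem.List.pyGetD sizes i 0) with
    | none => []   -- unreachable: pool ≠ [] when edges ≠ []
    | some best =>
      edges.filter (fun p => lc.1.get? p.1 == some best && lc.1.get? p.2 == some best)

-- ===== PRECONDITION & SPEC =====
-- Helpers for Pre_ only (independent of both ports): reach sets by iterated closure.
def pvOccPre (edges : List (Int × Int)) : List Int := edges.flatMap (fun p => [p.1, p.2])

def pvReachStep (edges : List (Int × Int)) (s : List Int) : List Int :=
  PySem.Set.update s (edges.flatMap (fun p =>
    if s.contains p.1 || s.contains p.2 then [p.1, p.2] else []))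

def pvReach (edges : List (Int × Int)) (x : Int) : List Int :=
  (pvReachStep edges)^[edges.length + 1] [x]

def pvNodesPre (edges : List (Int × Int)) : List Int := PySem.List.dedup (pvOccPre edges)

-- representatives: first-listed node of each connected component
def pvRepsPre (edges : List (Int × Int)) : List Int :=
  (pvNodesPre edges).filter (fun x =>
    ((pvNodesPre edges).find? (fun y => (pvReach edges x).contains y)).getD x == x)

def pvCompSize (edges : List (Int × Int)) (r : Int) : Nat :=
  (edges.filter (fun p =>
    (pvReach edges r).contains p.1 && (pvReach edges r).contains p.2)).length

def pvPoolPre (edges : List (Int × Int)) (fixed_nodes : List Int) : List Int :=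
  let withFix := (pvRepsPre edges).filter (fun r =>
    fixed_nodes.any (fun f => (pvReach edges r).contains f))
  if withFix.isEmpty then pvRepsPre edges else withFix

-- Pre_ excludes inputs where two distinct candidate components tie for the maximal edge
-- count: there A's pick depends on Python's set iteration order (hash order), which is an
-- accident of A's implementation and is not modelled.
def Pre_get_largest_connected_component_with_fixed_nodes (edges : List (Int × Int)) (fixed_nodes : List Int) : Prop :=
  edges = [] ∨
    (pvPoolPre edges fixed_nodes).countP
      (fun r => pvCompSize edges r ==
        ((pvPoolPre edges fixed_nodes).map (pvCompSize edges)).foldl max 0) = 1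

instance (edges : List (Int × Int)) (fixed_nodes : List Int) : Decidable (Pre_get_largest_connected_component_with_fixed_nodes edges fixed_nodes) := by unfold Pre_get_largest_connected_component_with_fixed_nodes; infer_instance

def pvWitness_get_largest_connected_component_with_fixed_nodes : (List (Int × Int)) × List Int :=
  ([(0, 1), (1, 2), (3, 4)], [3])

def Spec_get_largest_connected_component_with_fixed_nodes (edges : List (Int × Int)) (fixed_nodes : List Int) (out : List (Int × Int)) : Prop := out = get_largest_connected_component_with_fixed_nodes_alt edges fixed_nodes
instance (edges : List (Int × Int)) (fixed_nodes : List Int) (out : List (Int × Int)) : Decidable (Spec_get_largest_connected_component_with_fixed_nodes edges fixed_nodes out) := by unfold Spec_get_largest_connected_component_with_fixed_nodes; infer_instance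

-- ===== CLAIM (what is proved, stated in full; the proofs are below) =====
def Claim_equal_get_largest_connected_component_with_fixed_nodes : Prop := ∀ (edges : List (Int × Int)) (fixed_nodes : List Int), Dom_get_largest_connected_component_with_fixed_nodes edges fixed_nodes → Pre_get_largest_connected_component_with_fixed_nodes edges fixed_nodes → Spec_get_largest_connected_component_with_fixed_nodes edges fixed_nodes (get_largest_connected_component_with_fixed_nodes edges fixed_nodes)

-- ===== LEMMAS AND PROOFS =====

theorem pv_set_contains_add (s : PySem.Set Int) (c x : Int) :
    PySem.Set.contains (PySem.Set.add s c) x = (PySem.Set.contains s x || x == c) := by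
  by_cases h : c ∈ s
  · rw [PySem.Set.add_of_mem h]
    by_cases hx : x = c
    · subst hx; simp [PySem.Set.contains_eq_listContains, h]
    · simp [hx]
  · rw [PySem.Set.add_of_not_mem h]
    by_cases hx : x = c <;>
      simp [PySem.Set.contains_eq_listContains, hx]

theorem pv_bfsA_vis_mono (adj : PySem.Dict Int (List Int)) :
    ∀ (fuel : Nat) (q : List Int) (vis cs : PySem.Set Int) (x : Int),
      PySem.Set.contains vis x = true →
      PySem.Set.contains (pvBfsA adj fuel q vis cs).1 x = true := by
  intro fuel
  induction fuel with
  | zero => intro q vis cs x h; simpa [pvBfsA] using h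
  | succ f ih =>
    intro q vis cs x h
    cases q with
    | nil => simpa [pvBfsA] using h
    | cons curr rest =>
      by_cases hc : PySem.Set.contains vis curr = true
      · rw [pvBfsA, if_pos hc]; exact ih _ _ _ _ h
      · rw [pvBfsA, if_neg hc]
        apply ih
        rw [pv_set_contains_add]
        simp only [Bool.or_eq_true, h, true_or]

theorem pv_bfsA_start (adj : PySem.Dict Int (List Int)) (fuel : Nat) (q : List Int)
    (vis cs : PySem.Set Int) (y : Int) (hf : 1 ≤ fuel) :
    PySem.Set.contains (pvBfsA adj fuel (y :: q) vis cs).1 y = true := by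
  cases fuel with
  | zero => omega
  | succ f =>
    by_cases hc : PySem.Set.contains vis y = true
    · rw [pvBfsA, if_pos hc]; exact pv_bfsA_vis_mono adj f _ _ _ _ hc
    · rw [pvBfsA, if_neg hc]
      apply pv_bfsA_vis_mono
      rw [pv_set_contains_add]; simp

def pvExtend (c c' : PySem.Dict Int Int) (n : Int) : Prop :=
  ∀ x, c'.get? x = c.get? x ∨ (c.get? x = none ∧ c'.get? x = some n)

theorem pv_extend_trans {a b c : PySem.Dict Int Int} {n : Int}
    (h1 : pvExtend a b n) (h2 : pvExtend b c n) : pvExtend a c n := by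
  intro x
  rcases h2 x with h | ⟨hb, hc⟩
  · rcases h1 x with h' | ⟨ha, hb⟩
    · exact Or.inl (h.trans h')
    · exact Or.inr ⟨ha, h.trans hb⟩
  · rcases h1 x with h' | ⟨ha, hb'⟩
    · exact Or.inr ⟨by rw [← h']; exact hb, hc⟩
    · exact Or.inr ⟨ha, hc⟩

theorem pv_bfsB_extend (adj : PySem.Dict Int (List Int)) :
    ∀ (fuel : Nat) (q : List Int) (comp : PySem.Dict Int Int) (cid : Int),
      pvExtend comp (pvBfsB adj fuel q comp cid) cid := by
  intro fuel
  induction fuel with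
  | zero => intro q comp cid x; rw [pvBfsB]; exact Or.inl rfl
  | succ f ih =>
    intro q comp cid
    cases q with
    | nil => intro x; rw [pvBfsB]; exact Or.inl rfl
    | cons curr rest =>
      by_cases hc : comp.contains curr = true
      · rw [pvBfsB, if_pos hc]; exact ih _ _ _
      · rw [pvBfsB, if_neg hc]
        refine pv_extend_trans (fun x => ?_) (ih _ _ _)
        rw [PySem.Dict.get?_insert]
        by_cases hx : x = curr
        · subst hx
          exact Or.inr ⟨(PySem.Dict.get?_eq_none_iff_contains comp x).mpr (by simpa using hc), by simp⟩
        · rw [if_neg hx]; exact Or.inl rfl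

theorem pv_bfsB_val (adj : PySem.Dict Int (List Int)) :
    ∀ (fuel : Nat) (q : List Int) (comp : PySem.Dict Int Int) (cid : Int),
      0 ≤ cid →
      (∀ x i, comp.get? x = some i → 0 ≤ i ∧ i < cid + 1) →
      (∀ x i, (pvBfsB adj fuel q comp cid).get? x = some i → 0 ≤ i ∧ i < cid + 1) := by
  intro fuel
  induction fuel with
  | zero => intro q comp cid _ hv x i h; rw [pvBfsB] at h; exact hv x i h
  | succ f ih =>
    intro q comp cid hc0 hv
    cases q with
    | nil => intro x i h; rw [pvBfsB] at h; exact hv x i h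
    | cons curr rest =>
      by_cases hc : comp.contains curr = true
      · rw [pvBfsB, if_pos hc]; exact ih _ _ _ hc0 hv
      · rw [pvBfsB, if_neg hc]
        apply ih _ _ _ hc0
        intro x i h
        rw [PySem.Dict.get?_insert] at h
        by_cases hx : x = curr
        · rw [if_pos hx] at h
          cases h; omega
        · rw [if_neg hx] at h; exact hv x i h

def pvRelVis (vis : PySem.Set Int) (comp : PySem.Dict Int Int) : Prop :=
  ∀ x, PySem.Set.contains vis x = comp.contains x

def pvRelComp (cs : PySem.Set Int) (comp : PySem.Dict Int Int) (cid : Int) : Prop :=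
  ∀ x, PySem.Set.contains cs x = (comp.get? x == some cid)

theorem pv_bfs_sim (adj : PySem.Dict Int (List Int)) :
    ∀ (fuel : Nat) (q : List Int) (vis cs : PySem.Set Int) (comp : PySem.Dict Int Int)
      (cid : Int), pvRelVis vis comp → pvRelComp cs comp cid →
      pvRelVis (pvBfsA adj fuel q vis cs).1 (pvBfsB adj fuel q comp cid) ∧
      pvRelComp (pvBfsA adj fuel q vis cs).2 (pvBfsB adj fuel q comp cid) cid := by
  intro fuel
  induction fuel with
  | zero =>
    intro q vis cs comp cid hv hc
    rw [pvBfsA, pvBfsB]; exact ⟨hv, hc⟩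
  | succ f ih =>
    intro q vis cs comp cid hv hc
    cases q with
    | nil => rw [pvBfsA, pvBfsB]; exact ⟨hv, hc⟩
    | cons curr rest =>
      by_cases hcur : PySem.Set.contains vis curr = true
      · rw [pvBfsA, if_pos hcur, pvBfsB, if_pos (by rw [← hv curr]; exact hcur)]
        exact ih _ _ _ _ _ hv hc
      · rw [pvBfsA, if_neg hcur, pvBfsB, if_neg (by rw [← hv curr]; exact hcur)]
        have hv' : pvRelVis (PySem.Set.add vis curr) (comp.insert curr cid) := by
          intro x
          rw [pv_set_contains_add, PySem.Dict.contains_insert, hv x]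
          cases hxc : (x == curr) <;> simp
        have hc' : pvRelComp (PySem.Set.add cs curr) (comp.insert curr cid) cid := by
          intro x
          rw [pv_set_contains_add, PySem.Dict.get?_insert, hc x]
          by_cases hx : x = curr
          · subst hx; simp
          · simp [hx]
        have hq : (adj.getD curr []).filter
              (fun nb => !(PySem.Set.contains (PySem.Set.add vis curr) nb))
            = (adj.getD curr []).filter (fun nb => !((comp.insert curr cid).contains nb)) := by
          apply List.filter_congr
          intro x _
          rw [hv' x]
        show pvRelVis (pvBfsA adj f
              (rest ++ (adj.getD curr []).filter
                (fun nb => !(PySem.Set.contains (PySem.Set.add vis curr) nb)))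
              (PySem.Set.add vis curr) (PySem.Set.add cs curr)).1
            (pvBfsB adj f
              (rest ++ (adj.getD curr []).filter
                (fun nb => !((comp.insert curr cid).contains nb)))
              (comp.insert curr cid) cid) ∧
          pvRelComp (pvBfsA adj f
              (rest ++ (adj.getD curr []).filter
                (fun nb => !(PySem.Set.contains (PySem.Set.add vis curr) nb)))
              (PySem.Set.add vis curr) (PySem.Set.add cs curr)).2
            (pvBfsB adj f
              (rest ++ (adj.getD curr []).filter
                (fun nb => !((comp.insert curr cid).contains nb)))
              (comp.insert curr cid) cid) cid
        rw [hq]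
        exact ih _ _ _ _ _ hv' hc'

def pvEntryOK (edges : List (Int × Int)) (fixed : List Int) (comp : PySem.Dict Int Int)
    (j : Int) (e : pvEntry) : Prop :=
  (∀ x, PySem.Set.contains e.2.1 x = (comp.get? x == some j)) ∧
  e.1 = edges.filter (fun p =>
    PySem.Set.contains e.2.1 p.1 && PySem.Set.contains e.2.1 p.2) ∧
  e.2.2.1 = List.any e.2.1 (fun x => fixed.contains x) ∧
  e.2.2.2 = (e.1.length : Int)

def pvRel (edges : List (Int × Int)) (fixed : List Int)
    (stA : PySem.Set Int × List pvEntry) (stB : PySem.Dict Int Int × Int) : Prop :=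
  pvRelVis stA.1 stB.1 ∧ stB.2 = (stA.2.length : Int) ∧
  (∀ x i, stB.1.get? x = some i → 0 ≤ i ∧ i < stB.2) ∧
  (∀ (j : Nat) (e : pvEntry), stA.2[j]? = some e →
    pvEntryOK edges fixed stB.1 (j : Int) e)

theorem pv_entryOK_extend (edges : List (Int × Int)) (fixed : List Int)
    {comp comp' : PySem.Dict Int Int} {n j : Int} {e : pvEntry}
    (hx : pvExtend comp comp' n) (hj : j ≠ n)
    (h : pvEntryOK edges fixed comp j e) : pvEntryOK edges fixed comp' j e := by
  obtain ⟨h1, h2, h3, h4⟩ := h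
  refine ⟨?_, h2, h3, h4⟩
  intro x
  rw [h1 x]
  rcases hx x with he | ⟨hn, hs⟩
  · rw [he]
  · rw [hn, hs]
    simp [Ne.symm hj]

theorem pv_step_sim (edges : List (Int × Int)) (fixed : List Int)
    (adj : PySem.Dict Int (List Int)) (stA : PySem.Set Int × List pvEntry)
    (stB : PySem.Dict Int Int × Int) (node : Int)
    (h : pvRel edges fixed stA stB) :
    pvRel edges fixed (pvStepA edges fixed adj stA node) (pvLStep edges adj stB node) := by
  obtain ⟨hv, hn, hval, hent⟩ := h
  by_cases hc : PySem.Set.contains stA.1 node = true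
  · rw [pvStepA, if_pos hc, pvLStep, if_pos (by rw [← hv node]; exact hc)]
    exact ⟨hv, hn, hval, hent⟩
  · rw [pvStepA, if_neg hc, pvLStep, if_neg (by rw [← hv node]; exact hc)]
    have hcs0 : pvRelComp PySem.Set.empty stB.1 stB.2 := by
      intro x
      cases hg : stB.1.get? x with
      | none => simp [PySem.Set.contains, PySem.Set.empty]
      | some i =>
        have := (hval x i hg).2
        simp [PySem.Set.contains, PySem.Set.empty]
        omega
    have hsim := pv_bfs_sim adj (2 * edges.length + 2) [node] stA.1 PySem.Set.empty
      stB.1 stB.2 hv hcs0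
    have hext := pv_bfsB_extend adj (2 * edges.length + 2) [node] stB.1 stB.2
    have hval' := pv_bfsB_val adj (2 * edges.length + 2) [node] stB.1 stB.2
      (by rw [hn]; exact_mod_cast Int.natCast_nonneg _)
      (fun x i hg => by have := hval x i hg; omega)
    refine ⟨hsim.1, ?_, ?_, ?_⟩
    · simp only [List.length_append, List.length_cons, List.length_nil]
      rw [hn]; push_cast; ring
    · intro x i hg
      have := hval' x i hg
      omega
    · intro j e hj
      rcases lt_or_ge j stA.2.length with hlt | hge
      · rw [List.getElem?_append_left hlt] at hj
        have hold := hent j e hj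
        apply pv_entryOK_extend edges fixed hext _ hold
        rw [hn]
        intro hcontra
        have : (j : Int) < (stA.2.length : Int) := by exact_mod_cast hlt
        omega
      · rw [List.getElem?_append_right hge] at hj
        have hj0 : j = stA.2.length := by
          rcases Nat.lt_or_ge j (stA.2.length + 1) with h1 | h1
          · omega
          · rw [List.getElem?_eq_none (by simp; omega)] at hj
            simp at hj
        subst hj0
        simp only [Nat.sub_self, List.getElem?_cons_zero] at hj
        cases hj
        refine ⟨?_, rfl, rfl, rfl⟩
        intro x
        have := hsim.2 x
        rw [this, hn]

theorem pv_fold_sim (edges : List (Int × Int)) (fixed : List Int)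
    (adj : PySem.Dict Int (List Int)) :
    ∀ (occ : List Int) (stA : PySem.Set Int × List pvEntry)
      (stB : PySem.Dict Int Int × Int), pvRel edges fixed stA stB →
      pvRel edges fixed (occ.foldl (pvStepA edges fixed adj) stA)
        (occ.foldl (pvLStep edges adj) stB) := by
  intro occ
  induction occ with
  | nil => intro stA stB h; exact h
  | cons x rest ih =>
    intro stA stB h
    exact ih _ _ (pv_step_sim edges fixed adj stA stB x h)

theorem pv_stepA_skip (edges : List (Int × Int)) (fixed : List Int)
    (adj : PySem.Dict Int (List Int)) (st : PySem.Set Int × List pvEntry) (node : Int)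
    (h : PySem.Set.contains st.1 node = true) : pvStepA edges fixed adj st node = st := by
  rw [pvStepA, if_pos h]

theorem pv_stepA_dom_self (edges : List (Int × Int)) (fixed : List Int)
    (adj : PySem.Dict Int (List Int)) (st : PySem.Set Int × List pvEntry) (node : Int) :
    PySem.Set.contains (pvStepA edges fixed adj st node).1 node = true := by
  by_cases h : PySem.Set.contains st.1 node = true
  · rw [pv_stepA_skip edges fixed adj st node h]; exact h
  · rw [pvStepA, if_neg h]
    exact pv_bfsA_start adj _ _ _ _ _ (by omega)

theorem pv_stepA_dom_mono (edges : List (Int × Int)) (fixed : List Int)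
    (adj : PySem.Dict Int (List Int)) (st : PySem.Set Int × List pvEntry) (node y : Int)
    (h : PySem.Set.contains st.1 y = true) :
    PySem.Set.contains (pvStepA edges fixed adj st node).1 y = true := by
  by_cases hc : PySem.Set.contains st.1 node = true
  · rw [pv_stepA_skip edges fixed adj st node hc]; exact h
  · rw [pvStepA, if_neg hc]
    exact pv_bfsA_vis_mono adj _ _ _ _ _ h

theorem pv_foldA_skip (edges : List (Int × Int)) (fixed : List Int)
    (adj : PySem.Dict Int (List Int)) :
    ∀ (l : List Int) (st : PySem.Set Int × List pvEntry) (x : Int),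
      PySem.Set.contains st.1 x = true →
      (l.filter (fun y => !(y == x))).foldl (pvStepA edges fixed adj) st
        = l.foldl (pvStepA edges fixed adj) st := by
  intro l
  induction l with
  | nil => intro st x _; rfl
  | cons y rest ih =>
    intro st x h
    by_cases hy : y = x
    · subst hy
      rw [List.filter_cons_of_neg (by simp), List.foldl_cons,
        pv_stepA_skip edges fixed adj st y h]
      exact ih st y h
    · rw [List.filter_cons_of_pos (by simp [hy]), List.foldl_cons, List.foldl_cons]
      exact ih _ x (pv_stepA_dom_mono edges fixed adj st y x h)

theorem pv_foldA_ofList (edges : List (Int × Int)) (fixed : List Int)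
    (adj : PySem.Dict Int (List Int)) :
    ∀ (occ : List Int) (st : PySem.Set Int × List pvEntry),
      (PySem.Set.ofList occ).foldl (pvStepA edges fixed adj) st
        = occ.foldl (pvStepA edges fixed adj) st := by
  intro occ
  induction occ with
  | nil => intro st; rfl
  | cons x rest ih =>
    intro st
    rw [PySem.Set.ofList_cons, List.foldl_cons, List.foldl_cons]
    show ((PySem.Set.ofList rest).filter (fun y => !(y == x))).foldl
        (pvStepA edges fixed adj) (pvStepA edges fixed adj st x) = _
    rw [pv_foldA_skip edges fixed adj _ _ x
      (pv_stepA_dom_self edges fixed adj st x)]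
    exact ih _

theorem pv_foldl_flatMap_pair {σ : Type} (f : σ → Int → σ) :
    ∀ (edges : List (Int × Int)) (s : σ),
      (pvOccPre edges).foldl f s = edges.foldl (fun st p => f (f st p.1) p.2) s := by
  intro edges
  induction edges with
  | nil => intro s; rfl
  | cons p es ih =>
    intro s
    rw [pvOccPre, List.flatMap_cons, List.foldl_append]
    exact ih _

theorem pv_build_eq (edges : List (Int × Int)) :
    pvBuildA edges = (pvAdjB edges, PySem.Set.ofList (pvOccPre edges)) := by
  unfold pvBuildA pvAdjB
  rw [PySem.List.foldl_prod_mk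
    (fun (d : PySem.Dict Int (List Int)) (p : Int × Int) =>
      (d.modify p.1 [] (· ++ [p.2])).modify p.2 [] (· ++ [p.1]))
    (fun (s : PySem.Set Int) (p : Int × Int) =>
      PySem.Set.add (PySem.Set.add s p.1) p.2)
    edges PySem.Dict.empty PySem.Set.empty]
  congr 1
  rw [PySem.Set.ofList_eq_foldl, pv_foldl_flatMap_pair]
  rfl

-- sizes loop characterisation

theorem pv_sizes_go (comp : PySem.Dict Int Int) (n : Int)
    (hval : ∀ x i, comp.get? x = some i → 0 ≤ i ∧ i < n) :
    ∀ (l : List (Int × Int)) (arr : List Int), (arr.length : Int) = n →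
      ∀ (j : Nat), j < arr.length →
      (l.foldl (fun sizes p =>
          match comp.get? p.1, comp.get? p.2 with
          | some cu, some cv =>
            if cu == cv then PySem.List.pySetD sizes cu (PySem.List.pyGetD sizes cu 0 + 1)
            else sizes
          | _, _ => sizes) arr).getD j 0
        = arr.getD j 0 + ((l.filter (fun p =>
            comp.get? p.1 == some (j : Int) && comp.get? p.2 == some (j : Int))).length : Int) := by
  intro l
  induction l with
  | nil => intro arr _ j _; simp
  | cons p rest ih =>
    intro arr hlen j hj
    rw [List.foldl_cons]
    cases hg1 : comp.get? p.1 with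
    | none =>
      rw [List.filter_cons_of_neg (by simp [hg1])]
      exact ih arr hlen j hj
    | some cu =>
      cases hg2 : comp.get? p.2 with
      | none =>
        rw [List.filter_cons_of_neg (by simp [hg2])]
        simp only [hg1, hg2]
        exact ih arr hlen j hj
      | some cv =>
        simp only [hg1, hg2]

        by_cases hcc : cu = cv
        · subst hcc
          rw [if_pos (by simp)]
          have hcu := hval p.1 cu hg1
          have hcu' : cu.toNat < arr.length := by omega
          rw [PySem.List.pySetD_of_nonneg arr _ hcu.1,
            PySem.List.pyGetD_eq_getElem arr 0 hcu.1 (by omega)]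
          by_cases hje : (j : Int) = cu
          · rw [List.filter_cons_of_pos (by simp [hg1, hg2, hje.symm])]
            rw [ih _ (by simpa using hlen) j (by simpa using hj)]
            rw [List.getD_eq_getElem _ _ (by simpa using hj),
              List.getD_eq_getElem _ _ hj]
            have hjn : j = cu.toNat := by omega
            subst hjn
            rw [List.getElem_set_self]
            simp only [List.length_cons]
            push_cast
            ring
          · rw [List.filter_cons_of_neg (by simp [hg1, hg2]; intro h; omega)]
            rw [ih _ (by simpa using hlen) j (by simpa using hj)]
            have hjn : j ≠ cu.toNat := by omega
            rw [List.getD_eq_getElem _ _ (by simpa using hj),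
              List.getD_eq_getElem _ _ hj,
              List.getElem_set_ne (by omega)]
        · rw [if_neg (by simp [hcc])]
          rw [List.filter_cons_of_neg (by simp [hg1, hg2]; intro h1 h2; exact hcc (by omega))]
          exact ih arr hlen j hj

-- flags loop characterisation

theorem pv_flags_go (comp : PySem.Dict Int Int) (n : Int)
    (hval : ∀ x i, comp.get? x = some i → 0 ≤ i ∧ i < n) :
    ∀ (l : List Int) (arr : List Bool), (arr.length : Int) = n →
      ∀ (j : Nat), j < arr.length →
      (l.foldl (fun flags f =>
          match comp.get? f with
          | some cf => PySem.List.pySetD flags cf true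
          | none => flags) arr).getD j false
        = (arr.getD j false || l.any (fun f => comp.get? f == some (j : Int))) := by
  intro l
  induction l with
  | nil => intro arr _ j _; simp
  | cons f rest ih =>
    intro arr hlen j hj
    rw [List.foldl_cons]
    cases hg : comp.get? f with
    | none =>
      rw [ih arr hlen j hj]
      simp [hg]
    | some cf =>
      simp only [hg]
      have hcf := hval f cf hg
      rw [PySem.List.pySetD_of_nonneg arr _ hcf.1]
      rw [ih _ (by simpa using hlen) j (by simpa using hj)]
      rw [List.getD_eq_getElem _ _ (by simpa using hj), List.getD_eq_getElem _ _ hj]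
      by_cases hje : (j : Int) = cf
      · have hjn : j = cf.toNat := by omega
        subst hjn
        rw [List.getElem_set_self]
        have hbeq : ((some cf == some ((cf.toNat : Nat) : Int)) : Bool) = true := by
          simp; omega
        simp only [List.any_cons, hg, hbeq, Bool.true_or, Bool.or_true]
      · have hjn : j ≠ cf.toNat := by omega
        rw [List.getElem_set_ne (by omega)]
        simp only [List.any_cons, hg]
        have : ((some cf == some (j:Int)) : Bool) = false := by
          simp; omega
        rw [this]
        simp

theorem pv_sizes_length (edges : List (Int × Int)) (comp : PySem.Dict Int Int) (n : Int) :
    (pvSizes edges comp n).length = n.toNat := by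
  unfold pvSizes
  suffices h : ∀ (l : List (Int × Int)) (arr : List Int),
      (l.foldl (fun sizes p =>
        match comp.get? p.1, comp.get? p.2 with
        | some cu, some cv =>
          if cu == cv then PySem.List.pySetD sizes cu (PySem.List.pyGetD sizes cu 0 + 1)
          else sizes
        | _, _ => sizes) arr).length = arr.length by
    rw [h]; exact List.length_replicate
  intro l
  induction l with
  | nil => intro arr; rfl
  | cons p rest ih =>
    intro arr
    rw [List.foldl_cons]
    cases comp.get? p.1 <;> cases comp.get? p.2 <;>
      simp only [ih] <;> try rfl
    split <;> simp [PySem.List.length_pySetD]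

theorem pv_flags_length (fixed : List Int) (comp : PySem.Dict Int Int) (n : Int) :
    (pvFlags fixed comp n).length = n.toNat := by
  unfold pvFlags
  suffices h : ∀ (l : List Int) (arr : List Bool),
      (l.foldl (fun flags f =>
        match comp.get? f with
        | some cf => PySem.List.pySetD flags cf true
        | none => flags) arr).length = arr.length by
    rw [h]; exact List.length_replicate
  intro l
  induction l with
  | nil => intro arr; rfl
  | cons f rest ih =>
    intro arr
    rw [List.foldl_cons]
    cases comp.get? f <;> simp [ih, PySem.List.length_pySetD]

theorem pv_map_range_getD {α : Type} (l : List α) (d : α) :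
    (PySem.List.pyRange 0 (l.length : Int) 1).map (fun i => l.getD i.toNat d) = l := by
  rw [PySem.List.pyRange_one]
  apply List.ext_getElem
  · simp
  · intro i h1 h2
    simp [List.getD_eq_getElem?_getD, List.getElem?_eq_getElem h2]

theorem pv_max?_snoc_none {α : Type} (l : List α) (k : α → Int) (x : α)
    (h : PySem.List.max? l k = none) : PySem.List.max? (l ++ [x]) k = some x := by
  unfold PySem.List.max? at h ⊢
  rw [List.foldl_append, h]
  rfl

theorem pv_max?_snoc_some {α : Type} (l : List α) (k : α → Int) (x m : α)
    (h : PySem.List.max? l k = some m) :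
    PySem.List.max? (l ++ [x]) k = if k m < k x then some x else some m := by
  unfold PySem.List.max? at h ⊢
  rw [List.foldl_append, h]
  rfl

theorem pv_max?_map {α : Type} (ent : Int → α) (kA : α → Int) (kB : Int → Int)
    (l : List Int) (hk : ∀ i ∈ l, kA (ent i) = kB i) :
    PySem.List.max? (l.map ent) kA = Option.map ent (PySem.List.max? l kB) := by
  induction l using List.reverseRecOn with
  | nil => rfl
  | append_singleton l i ih =>
    have hk' : ∀ j ∈ l, kA (ent j) = kB j := fun j hj => hk j (by simp [hj])
    have hki : kA (ent i) = kB i := hk i (by simp)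
    rw [List.map_append, List.map_singleton]
    cases hm : PySem.List.max? l kB with
    | none =>
      rw [pv_max?_snoc_none l kB i hm] at *
      rw [pv_max?_snoc_none (l.map ent) kA (ent i) (by rw [ih hk', hm]; rfl)]
      rfl
    | some m =>
      have hmem := PySem.List.max?_mem hm
      rw [pv_max?_snoc_some l kB i m hm,
        pv_max?_snoc_some (l.map ent) kA (ent i) (ent m) (by rw [ih hk', hm]; rfl),
        hk' m hmem, hki]
      by_cases hlt : kB m < kB i
      · rw [if_pos hlt, if_pos hlt]; rfl
      · rw [if_neg hlt, if_neg hlt]; rfl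

theorem pv_any_flag (fixed : List Int) (comp : PySem.Dict Int Int) (i : Int)
    (cs : PySem.Set Int) (h : ∀ x, PySem.Set.contains cs x = (comp.get? x == some i)) :
    List.any cs (fun x => fixed.contains x) = fixed.any (fun f => comp.get? f == some i) := by
  rw [Bool.eq_iff_iff]
  simp only [List.any_eq_true]
  constructor
  · rintro ⟨x, hx, hfx⟩
    refine ⟨x, by simpa using hfx, ?_⟩
    rw [← h x]
    simpa [PySem.Set.contains_eq_listContains] using hx
  · rintro ⟨f, hf, hgf⟩
    have hc := h f
    rw [hgf] at hc
    refine ⟨f, ?_, by simpa using hf⟩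
    have : PySem.Set.contains cs f = true := by rw [hc]
    simpa [PySem.Set.contains_eq_listContains] using this

theorem pv_entry_edges (edges : List (Int × Int)) (fixed : List Int)
    (comp : PySem.Dict Int Int) (i : Int) (e : pvEntry)
    (h : pvEntryOK edges fixed comp i e) :
    e.1 = edges.filter (fun p =>
      comp.get? p.1 == some i && comp.get? p.2 == some i) := by
  rw [h.2.1]
  apply List.filter_congr
  intro p _
  rw [h.1 p.1, h.1 p.2]

theorem pv_final (edges : List (Int × Int)) (fixed : List Int)
    (comps : List pvEntry) (comp : PySem.Dict Int Int) (n : Int)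
    (hn : n = (comps.length : Int))
    (hval : ∀ x i, comp.get? x = some i → 0 ≤ i ∧ i < n)
    (hent : ∀ (j : Nat) (e : pvEntry), comps[j]? = some e →
      pvEntryOK edges fixed comp (j : Int) e) :
    (if (comps.filter (fun c => c.2.2.1)).isEmpty then
       match PySem.List.max? comps (fun c => c.2.2.2) with
       | none => ([] : List (Int × Int)) | some c => c.1
     else
       match PySem.List.max? (comps.filter (fun c => c.2.2.1)) (fun c => c.2.2.2) with
       | none => [] | some c => c.1)
    = (match PySem.List.max?
          (if ((PySem.List.pyRange 0 n 1).filter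
                (fun i => PySem.List.pyGetD (pvFlags fixed comp n) i false)).isEmpty
           then PySem.List.pyRange 0 n 1
           else (PySem.List.pyRange 0 n 1).filter
                (fun i => PySem.List.pyGetD (pvFlags fixed comp n) i false))
          (fun i => PySem.List.pyGetD (pvSizes edges comp n) i 0) with
       | none => []
       | some best => edges.filter (fun p =>
           comp.get? p.1 == some best && comp.get? p.2 == some best)) := by
  have hn0 : 0 ≤ n := by rw [hn]; exact_mod_cast Int.natCast_nonneg _
  have hflen : (pvFlags fixed comp n).length = n.toNat := pv_flags_length fixed comp n
  have hslen : (pvSizes edges comp n).length = n.toNat := pv_sizes_length edges comp n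
  have hmem : ∀ i ∈ PySem.List.pyRange 0 n 1, 0 ≤ i ∧ i < n := by
    intro i hi
    have := PySem.List.mem_pyRange_one.mp hi
    omega
  have hrange : (PySem.List.pyRange 0 n 1).map
      (fun i => comps.getD i.toNat ([], PySem.Set.empty, false, 0)) = comps := by
    rw [hn]; exact pv_map_range_getD comps _
  set ent : Int → pvEntry := fun i => comps.getD i.toNat ([], PySem.Set.empty, false, 0)
    with hentdef
  have hEOK : ∀ i, 0 ≤ i → i < n → pvEntryOK edges fixed comp i (ent i) := by
    intro i h0 h1
    have hlt : i.toNat < comps.length := by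
      rw [hn] at h1; omega
    have hsome : comps[i.toNat]? = some (ent i) := by
      rw [hentdef]
      simp only [List.getD_eq_getElem _ _ hlt, List.getElem?_eq_getElem hlt]
    have h := hent i.toNat _ hsome
    have hcast : ((i.toNat : Nat) : Int) = i := by omega
    rwa [hcast] at h
  have hflag : ∀ i ∈ PySem.List.pyRange 0 n 1,
      (ent i).2.2.1 = PySem.List.pyGetD (pvFlags fixed comp n) i false := by
    intro i hi
    obtain ⟨h0, h1⟩ := hmem i hi
    have hlt : i.toNat < (pvFlags fixed comp n).length := by rw [hflen]; omega
    rw [PySem.List.pyGetD_eq_getElem _ _ h0 (by rw [hflen]; omega)]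
    rw [← List.getD_eq_getElem _ false hlt]
    have hgo := pv_flags_go comp n hval fixed (List.replicate n.toNat false)
      (by rw [List.length_replicate]; omega) i.toNat (by rw [List.length_replicate]; omega)
    unfold pvFlags
    rw [hgo]
    have hrep : (List.replicate n.toNat false).getD i.toNat false = false := by
      rw [List.getD_eq_getElem?_getD, List.getElem?_replicate,
        if_pos (by omega : i.toNat < n.toNat)]
      rfl
    rw [hrep, Bool.false_or]
    have hcast : ((i.toNat : Nat) : Int) = i := by omega
    rw [hcast]
    have he := hEOK i h0 h1
    rw [he.2.2.1]
    exact pv_any_flag fixed comp i _ he.1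
  have hsize : ∀ i ∈ PySem.List.pyRange 0 n 1,
      (ent i).2.2.2 = PySem.List.pyGetD (pvSizes edges comp n) i 0 := by
    intro i hi
    obtain ⟨h0, h1⟩ := hmem i hi
    have hlt : i.toNat < (pvSizes edges comp n).length := by rw [hslen]; omega
    rw [PySem.List.pyGetD_eq_getElem _ _ h0 (by rw [hslen]; omega)]
    rw [← List.getD_eq_getElem _ 0 hlt]
    have hgo := pv_sizes_go comp n hval edges (List.replicate n.toNat 0)
      (by rw [List.length_replicate]; omega) i.toNat (by rw [List.length_replicate]; omega)
    unfold pvSizes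
    rw [hgo]
    have hrep : (List.replicate n.toNat (0:Int)).getD i.toNat 0 = 0 := by
      rw [List.getD_eq_getElem?_getD, List.getElem?_replicate,
        if_pos (by omega : i.toNat < n.toNat)]
      rfl
    rw [hrep, zero_add]
    have hcast : ((i.toNat : Nat) : Int) = i := by omega
    rw [hcast]
    have he := hEOK i h0 h1
    rw [he.2.2.2, pv_entry_edges edges fixed comp i _ he]
  have hvalid : comps.filter (fun c => c.2.2.1)
      = ((PySem.List.pyRange 0 n 1).filter
          (fun i => PySem.List.pyGetD (pvFlags fixed comp n) i false)).map ent := by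
    rw [← hrange, List.filter_map]
    congr 1
    apply List.filter_congr
    intro i hi
    simp only [Function.comp_apply]
    exact hflag i hi
  rw [hvalid]
  have hbranch : (((PySem.List.pyRange 0 n 1).filter
      (fun i => PySem.List.pyGetD (pvFlags fixed comp n) i false)).map ent).isEmpty
      = ((PySem.List.pyRange 0 n 1).filter
          (fun i => PySem.List.pyGetD (pvFlags fixed comp n) i false)).isEmpty := by
    simp
  by_cases hp : ((PySem.List.pyRange 0 n 1).filter
      (fun i => PySem.List.pyGetD (pvFlags fixed comp n) i false)).isEmpty
  · rw [if_pos (by rw [hbranch]; exact hp), if_pos hp]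
    rw [← hrange, pv_max?_map ent _ _ _ hsize]
    cases hm : PySem.List.max? (PySem.List.pyRange 0 n 1)
        (fun i => PySem.List.pyGetD (pvSizes edges comp n) i 0) with
    | none => rfl
    | some b =>
      simp only [Option.map_some]
      have hb := hmem b (PySem.List.max?_mem hm)
      exact pv_entry_edges edges fixed comp b _ (hEOK b hb.1 hb.2)
  · rw [if_neg (by rw [hbranch]; exact hp), if_neg hp]
    have hkpool : ∀ i ∈ (PySem.List.pyRange 0 n 1).filter
        (fun i => PySem.List.pyGetD (pvFlags fixed comp n) i false),
        (ent i).2.2.2 = PySem.List.pyGetD (pvSizes edges comp n) i 0 := by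
      intro i hi
      exact hsize i (List.mem_of_mem_filter hi)
    rw [pv_max?_map ent _ _ _ hkpool]
    cases hm : PySem.List.max? ((PySem.List.pyRange 0 n 1).filter
        (fun i => PySem.List.pyGetD (pvFlags fixed comp n) i false))
        (fun i => PySem.List.pyGetD (pvSizes edges comp n) i 0) with
    | none => rfl
    | some b =>
      simp only [Option.map_some]
      have hb := hmem b (List.mem_of_mem_filter (PySem.List.max?_mem hm))
      exact pv_entry_edges edges fixed comp b _ (hEOK b hb.1 hb.2)

theorem pv_rel_init (edges : List (Int × Int)) (fixed : List Int) :
    pvRel edges fixed (PySem.Set.empty, ([] : List pvEntry)) (PySem.Dict.empty, 0) := by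
  refine ⟨?_, by simp, ?_, ?_⟩
  · intro x
    simp [PySem.Set.contains, PySem.Set.empty, PySem.Dict.contains_empty]
  · intro x i h
    rw [PySem.Dict.get?_empty] at h
    simp at h
  · intro j e h
    simp at h

theorem pv_label_eq (edges : List (Int × Int)) (adj : PySem.Dict Int (List Int)) :
    pvLabel edges adj
      = (pvOccPre edges).foldl (pvLStep edges adj) (PySem.Dict.empty, 0) := by
  rw [pvLabel, pv_foldl_flatMap_pair]

theorem pv_main (edges : List (Int × Int)) (fixed_nodes : List Int) :
    get_largest_connected_component_with_fixed_nodes edges fixed_nodes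
      = get_largest_connected_component_with_fixed_nodes_alt edges fixed_nodes := by
  by_cases he : edges.isEmpty
  · rw [get_largest_connected_component_with_fixed_nodes,
      get_largest_connected_component_with_fixed_nodes_alt, if_pos he, if_pos he]
  · rw [get_largest_connected_component_with_fixed_nodes,
      get_largest_connected_component_with_fixed_nodes_alt, if_neg he, if_neg he]
    simp only [pv_build_eq, pv_label_eq]
    rw [pv_foldA_ofList]
    have hrel := pv_fold_sim edges fixed_nodes (pvAdjB edges) (pvOccPre edges)
      (PySem.Set.empty, []) (PySem.Dict.empty, 0) (pv_rel_init edges fixed_nodes)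
    obtain ⟨hv, hn, hval, hent⟩ := hrel
    exact pv_final edges fixed_nodes _ _ _ hn hval hent

theorem pv_witness_ok :
    Dom_get_largest_connected_component_with_fixed_nodes
      pvWitness_get_largest_connected_component_with_fixed_nodes.1
      pvWitness_get_largest_connected_component_with_fixed_nodes.2 ∧
    Pre_get_largest_connected_component_with_fixed_nodes
      pvWitness_get_largest_connected_component_with_fixed_nodes.1
      pvWitness_get_largest_connected_component_with_fixed_nodes.2 := by
  constructor <;> decide

-- ===== VERDICT (by name: the statement is the Claim_ definition above) =====
theorem get_largest_connected_component_with_fixed_nodes_spec : Claim_equal_get_largest_connected_component_with_fixed_nodes := by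
  intro edges fixed_nodes _ hpre
  unfold Spec_get_largest_connected_component_with_fixed_nodes
  rcases hpre with hnil | huniq
  · subst hnil; rfl
  · exact pv_main edges fixed_nodes
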